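-- pv_equiv track=rewrite | github.com/yeolsim2hajo/Team_hard | wonkyoung/programmers/level 0/문자열_정렬하기_1.py | solution
-- ===== SOURCE A (Python) =====
-- def solution(my_string):
--     my_string = sorted(my_string)
--     answer = []
--     try:
--         for element in my_string:
--             answer.append(int(element))
--         return answer
--     except Exception:
--         return answer
-- ===== SOURCE B (Python) =====
-- def solution(my_string):
--     counts = [0] * 10
--     for c in my_string:
--         if '0' <= c <= '9':
--             counts[ord(c) - ord('0')] += 1
--     return [d for d in range(10) for _ in range(counts[d])]
-- ===== Notes on version B (the rewrite author's own statement) =====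
-- stated objective: faster
-- what changed: B replaces A's sort-the-whole-string-then-convert-until-exception with a single counting pass (a 10-slot tally of digit characters) emitted in order, removing the sort.
-- intended difference: On strings containing at least one digit together with a character whose code is below that of every digit (space, punctuation, etc.), A returns [] because that character sorts first and int() raises before any digit is reached, discarding the digits; B returns the sorted digit values, which is the intended result of a digit extractor. — e.g. on solution(" 1"): A returns [], B returns [1]
import Mathlib
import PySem

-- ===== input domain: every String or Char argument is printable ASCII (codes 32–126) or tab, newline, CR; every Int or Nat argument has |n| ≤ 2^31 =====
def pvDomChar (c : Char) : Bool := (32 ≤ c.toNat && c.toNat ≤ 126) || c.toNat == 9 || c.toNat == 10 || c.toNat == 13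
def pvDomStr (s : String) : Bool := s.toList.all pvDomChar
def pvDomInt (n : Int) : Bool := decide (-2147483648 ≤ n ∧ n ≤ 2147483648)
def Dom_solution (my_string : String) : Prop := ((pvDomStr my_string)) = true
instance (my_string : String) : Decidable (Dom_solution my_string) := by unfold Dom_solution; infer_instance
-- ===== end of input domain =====

-- B replaces A's sort-then-convert-until-exception with a single counting pass
-- (a 10-slot tally of digit characters) emitted in order.

-- ===== PORT A =====
-- int(element) on a one-character string is PySem.Int.ofChars? on the singleton char list (exact).
def pvA_loop : List Char → List Int → List Int
  | [], answer => answer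
  | c :: rest, answer =>
    match PySem.Int.ofChars? [c] with
    | some n => pvA_loop rest (answer ++ [n])
    | none => answer

def solution (my_string : String) : List Int :=
  pvA_loop (PySem.List.sorted my_string.toList (fun x => x) false) []

-- ===== PORT B =====
-- one step of B's loop: tally a digit character into the 10-slot list
def pvB_step (counts : List Int) (c : Char) : List Int :=
  if '0' ≤ c ∧ c ≤ '9' then
    counts.set (c.toNat - 48) (counts.getD (c.toNat - 48) 0 + 1)
  else counts

def solution_alt (my_string : String) : List Int :=
  let counts := my_string.toList.foldl pvB_step (List.replicate 10 0)
  (PySem.List.pyRange 0 10 1).flatMap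
    (fun d => (PySem.List.pyRange 0 (counts.getD d.toNat 0) 1).map (fun _ => d))

-- ===== PRECONDITION & SPEC =====
-- On strings containing at least one digit together with a character whose code is below that of
-- every digit (space, punctuation, …), A returns [] (that character sorts first, so int() raises
-- before any digit is reached, discarding the digits); B returns the sorted digit values, the
-- intended result of a digit extractor.
def D_solution (my_string : String) : Prop :=
  (my_string.toList.any (fun c => decide (c.toNat < 48))) = true ∧
  (my_string.toList.any (fun c => decide (48 ≤ c.toNat ∧ c.toNat ≤ 57))) = true
instance (my_string : String) : Decidable (D_solution my_string) := by
  unfold D_solution; infer_instance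

def Spec_solution (my_string : String) (out : List Int) : Prop :=
  ¬ D_solution my_string → out = solution_alt my_string
instance (my_string : String) (out : List Int) : Decidable (Spec_solution my_string out) := by
  unfold Spec_solution; infer_instance

def pvDiffWitness_solution : String := " 1"
def pvDiffWitnessOut_solution : (List Int) × (List Int) := ([], [1])

-- ===== CLAIM (what is proved, stated in full; the proofs are below) =====
def Claim_unchanged_solution : Prop :=
  ∀ (my_string : String), Dom_solution my_string → Spec_solution my_string (solution my_string)
def Claim_changed_solution : Prop :=
  Dom_solution (pvDiffWitness_solution) ∧ D_solution (pvDiffWitness_solution) ∧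
  solution (pvDiffWitness_solution) = pvDiffWitnessOut_solution.1 ∧
  solution_alt (pvDiffWitness_solution) = pvDiffWitnessOut_solution.2 ∧
  pvDiffWitnessOut_solution.1 ≠ pvDiffWitnessOut_solution.2
def Claim_exact_solution : Prop :=
  ∀ (my_string : String), Dom_solution my_string → D_solution my_string →
    solution my_string ≠ solution_alt my_string

-- ===== LEMMAS AND PROOFS =====

theorem pvD_iff (s : String) : D_solution s ↔
    (∃ c ∈ s.toList, c.toNat < 48) ∧ (∃ c ∈ s.toList, 48 ≤ c.toNat ∧ c.toNat ≤ 57) := by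
  unfold D_solution
  simp [List.any_eq_true]

theorem pvLe48 (c : Char) : ('0' ≤ c) ↔ 48 ≤ c.toNat := by
  simp [Char.le_def, UInt32.le_iff_toNat_le]

theorem pvLe57 (c : Char) : (c ≤ '9') ↔ c.toNat ≤ 57 := by
  simp [Char.le_def, UInt32.le_iff_toNat_le]

theorem pvLeChar (c d : Char) : (c ≤ d) ↔ c.toNat ≤ d.toNat := by
  simp [Char.le_def, UInt32.le_iff_toNat_le]

theorem pvToNat_inj {c d : Char} (h : c.toNat = d.toNat) : c = d := by
  have := Char.ofNat_toNat c
  rw [h, Char.ofNat_toNat] at this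
  exact this.symm

theorem pvOfNat_toNat (k : Nat) (h48 : 48 ≤ k) (h57 : k ≤ 57) :
    (Char.ofNat k).toNat = k := by
  rw [Char.toNat_ofNat, if_pos]
  constructor; omega

set_option maxRecDepth 10000 in
theorem pvOfCharsTable : ∀ k ∈ Finset.range 127, PySem.Int.ofChars? [Char.ofNat k] =
    (if 48 ≤ k ∧ k ≤ 57 then some ((k : Int) - 48) else none) := by decide

theorem pvOfChars_singleton (c : Char) (hdom : pvDomChar c = true) :
    PySem.Int.ofChars? [c] =
      (if 48 ≤ c.toNat ∧ c.toNat ≤ 57 then some ((c.toNat : Int) - 48) else none) := by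
  have h127 : c.toNat < 127 := by
    unfold pvDomChar at hdom
    simp only [Bool.or_eq_true, Bool.and_eq_true, decide_eq_true_eq, beq_iff_eq] at hdom
    omega
  have := pvOfCharsTable c.toNat (Finset.mem_range.mpr h127)
  rwa [Char.ofNat_toNat] at this

-- the value A appends for a digit character
def pvVal (c : Char) : Int := (c.toNat : Int) - 48

theorem pvVal_inj : Function.Injective pvVal := by
  intro a b h
  unfold pvVal at h
  exact pvToNat_inj (by omega)

theorem pvA_loop_sorted : ∀ (S : List Char) (acc : List Int),
    S.Pairwise (· ≤ ·) → (∀ c ∈ S, pvDomChar c = true) → (∀ c ∈ S, ¬ c.toNat < 48) →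
    pvA_loop S acc = acc ++ (S.filter (fun c => decide (c ≤ '9'))).map pvVal := by
  intro S
  induction S with
  | nil => intro acc _ _ _; simp [pvA_loop]
  | cons c rest ih =>
    intro acc hp hdom hlow
    have hc48 : 48 ≤ c.toNat := by
      have := hlow c (by simp); omega
    by_cases hdig : c ≤ '9'
    · have h57 : c.toNat ≤ 57 := (pvLe57 c).mp hdig
      have hsome : PySem.Int.ofChars? [c] = some ((c.toNat : Int) - 48) := by
        rw [pvOfChars_singleton c (hdom c (by simp))]
        simp [hc48, h57]
      simp only [pvA_loop, hsome]
      rw [ih (acc ++ [(c.toNat : Int) - 48]) (List.Pairwise.of_cons hp)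
        (fun d hd => hdom d (by simp [hd])) (fun d hd => hlow d (by simp [hd]))]
      simp [hdig, pvVal]
    · have h57 : ¬ c.toNat ≤ 57 := fun h => hdig ((pvLe57 c).mpr h)
      have hnone : PySem.Int.ofChars? [c] = none := by
        rw [pvOfChars_singleton c (hdom c (by simp))]
        simp; omega
      have hrest : ∀ d ∈ rest, ¬ d ≤ '9' := by
        intro d hd hle
        have hcd : c ≤ d := (List.pairwise_cons.mp hp).1 d hd
        rw [pvLeChar] at hcd
        rw [pvLe57] at hle
        omega
      have hfilter : (c :: rest).filter (fun c => decide (c ≤ '9')) = [] := by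
        rw [List.filter_eq_nil_iff]
        intro d hd
        rcases List.mem_cons.mp hd with rfl | hmem
        · simp only [decide_eq_true_eq]; exact hdig
        · simp only [decide_eq_true_eq]; exact hrest d hmem
      simp [pvA_loop, hnone, hfilter]

-- A returns [] as soon as some character of the string has code < 48
theorem pvA_empty (s : String) (hdom : ∀ c ∈ s.toList, pvDomChar c = true)
    (hlow : ∃ c ∈ s.toList, c.toNat < 48) : solution s = [] := by
  unfold solution
  rcases hlow with ⟨c, hc, hclt⟩
  rcases hS : PySem.List.sorted s.toList (fun x => x) false with _ | ⟨m, t⟩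
  · simp [pvA_loop]
  · have hmle : m ≤ c := PySem.List.key_head_sorted_le s.toList (fun x => x) hS c hc
    have hm48 : m.toNat < 48 := by
      have := (pvLeChar m c).mp hmle; omega
    have hmdom : pvDomChar m = true := by
      apply hdom
      have hmm : m ∈ PySem.List.sorted s.toList (fun x => x) false := by rw [hS]; simp
      exact (PySem.List.mem_sorted s.toList (fun x => x) false m).mp hmm
    have hnone : PySem.Int.ofChars? [m] = none := by
      rw [pvOfChars_singleton m hmdom]
      simp; omega
    simp [pvA_loop, hnone]

-- B's tally: slot d of the fold result counts the occurrences of the digit character d+48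
theorem pvB_counts : ∀ (l : List Char) (counts : List Int), counts.length = 10 →
    ∀ d : Nat, d < 10 →
    (l.foldl pvB_step counts).getD d 0
      = counts.getD d 0 + (l.count (Char.ofNat (d + 48)) : Int) := by
  intro l
  induction l with
  | nil => intro counts _ d _; simp
  | cons c rest ih =>
    intro counts hlen d hd
    have hchar : (Char.ofNat (d + 48)).toNat = d + 48 :=
      pvOfNat_toNat (d + 48) (by omega) (by omega)
    simp only [List.foldl_cons]
    by_cases hdig : '0' ≤ c ∧ c ≤ '9'
    · have h48 : 48 ≤ c.toNat := (pvLe48 c).mp hdig.1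
      have h57 : c.toNat ≤ 57 := (pvLe57 c).mp hdig.2
      have hstep : pvB_step counts c
          = counts.set (c.toNat - 48) (counts.getD (c.toNat - 48) 0 + 1) := by
        simp [pvB_step, hdig]
      have hlen' : (pvB_step counts c).length = 10 := by
        rw [hstep, List.length_set, hlen]
      rw [ih _ hlen' d hd, hstep]
      have hgetD : (counts.set (c.toNat - 48) (counts.getD (c.toNat - 48) 0 + 1)).getD d 0
          = if c.toNat - 48 = d then counts.getD d 0 + 1 else counts.getD d 0 := by
        by_cases hde : c.toNat - 48 = d
        · subst hde
          simp only [List.getD]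
          rw [List.getElem?_set_self (by omega)]
          simp
        · simp only [if_neg hde, List.getD, List.getElem?_set_ne hde]
      rw [hgetD]
      by_cases hde : c.toNat - 48 = d
      · have hceq : c = Char.ofNat (d + 48) := pvToNat_inj (by omega)
        rw [if_pos hde, List.count_cons, if_pos (by simp [hceq])]
        push_cast; ring
      · have hne : c ≠ Char.ofNat (d + 48) := by
          intro h
          apply hde
          rw [h, hchar]
          omega
        rw [if_neg hde, List.count_cons, if_neg (by simp [hne])]
        simp
    · have hstep : pvB_step counts c = counts := by simp [pvB_step, hdig]
      rw [hstep, ih _ (by rw [hlen]) d hd]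
      have hne : c ≠ Char.ofNat (d + 48) := by
        intro h
        apply hdig
        constructor
        · rw [pvLe48, h, hchar]; omega
        · rw [pvLe57, h, hchar]; omega
      rw [List.count_cons, if_neg (by simp [hne])]
      simp

theorem pvRep_eq (n : Int) (d : Int) :
    (PySem.List.pyRange 0 n 1).map (fun _ => d) = List.replicate n.toNat d := by
  rw [PySem.List.pyRange_one, List.eq_replicate_iff]
  constructor
  · simp
  · intro x hx; simp at hx; omega

-- B's result in closed form: digits 0..9, each replicated by its multiplicity in the string
theorem pvB_closed (s : String) :
    solution_alt s = (PySem.List.pyRange 0 10 1).flatMap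
      (fun d => List.replicate (s.toList.count (Char.ofNat (d.toNat + 48))) d) := by
  unfold solution_alt
  simp only []
  apply List.flatMap_congr
  intro d hd
  rcases PySem.List.mem_pyRange_one.mp hd with ⟨hd0, hd10⟩
  rw [pvB_counts s.toList (List.replicate 10 0) (by simp) d.toNat (by omega)]
  have h0 : (List.replicate 10 (0 : Int)).getD d.toNat 0 = 0 := by
    simp only [List.getD, List.getElem?_replicate]
    split <;> rfl
  rw [h0, zero_add, pvRep_eq, Int.toNat_natCast]

theorem pvPairwise_flatMap : ∀ (ds : List Int), ds.Pairwise (· ≤ ·) → ∀ (cnt : Int → Nat),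
    (ds.flatMap (fun d => List.replicate (cnt d) d)).Pairwise (· ≤ ·) := by
  intro ds
  induction ds with
  | nil => intro _ _; simp
  | cons d rest ih =>
    intro hp cnt
    simp only [List.flatMap_cons]
    rw [List.pairwise_append]
    refine ⟨List.pairwise_replicate.mpr (Or.inr le_rfl), ih (List.Pairwise.of_cons hp) cnt, ?_⟩
    intro a ha b hb
    have ha' : a = d := List.eq_of_mem_replicate ha
    rcases List.mem_flatMap.mp hb with ⟨e, he, hbe⟩
    have hb' : b = e := List.eq_of_mem_replicate hbe
    rw [ha', hb']
    exact (List.pairwise_cons.mp hp).1 e he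

theorem pvCount_flatMap : ∀ (ds : List Int), ds.Nodup → ∀ (cnt : Int → Nat) (a : Int),
    (ds.flatMap (fun d => List.replicate (cnt d) d)).count a = if a ∈ ds then cnt a else 0 := by
  intro ds
  induction ds with
  | nil => intro _ _ a; simp
  | cons d rest ih =>
    intro hnd cnt a
    simp only [List.flatMap_cons, List.count_append, List.count_replicate,
      ih (List.Nodup.of_cons hnd) cnt a, List.mem_cons]
    rcases List.nodup_cons.mp hnd with ⟨hdnot, _⟩
    by_cases had : a = d
    · subst had
      simp [hdnot]
    · simp [had, Ne.symm had]

-- ===== VERDICT (by name: the statements are the Claim_ definitions above) =====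
theorem solution_spec : Claim_unchanged_solution := by
  intro s hdom
  unfold Spec_solution
  intro hnD
  unfold Dom_solution pvDomStr at hdom
  rw [List.all_eq_true] at hdom
  set l := s.toList with hl
  by_cases hlow : ∃ c ∈ l, c.toNat < 48
  · -- some character has code < 48; outside D_ there is then no digit: both sides are []
    have hnodig : ∀ c ∈ l, ¬ (48 ≤ c.toNat ∧ c.toNat ≤ 57) := by
      intro c hc hdig
      have hD : D_solution s := (pvD_iff s).mpr (by rw [← hl]; exact ⟨hlow, c, hc, hdig⟩)
      exact hnD hD
    have hA : solution s = [] := pvA_empty s hdom hlow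
    have hB : solution_alt s = [] := by
      rw [pvB_closed]
      rw [List.flatMap_eq_nil_iff]
      intro d hd
      rcases PySem.List.mem_pyRange_one.mp hd with ⟨hd0, hd10⟩
      have hcnt : l.count (Char.ofNat (d.toNat + 48)) = 0 := by
        rw [List.count_eq_zero]
        intro hmem
        have hv := pvOfNat_toNat (d.toNat + 48) (by omega) (by omega)
        exact hnodig _ hmem (by omega)
      rw [hcnt]
      simp
    rw [hA, hB]
  · -- every character has code ≥ 48: A returns the sorted digit values, B the tallied ones
    have hlow' : ∀ c ∈ l, ¬ c.toNat < 48 := fun c hc hlt => hlow ⟨c, hc, hlt⟩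
    have hlowS : ∀ c ∈ PySem.List.sorted l (fun x => x) false, ¬ c.toNat < 48 := by
      intro c hc; exact hlow' c ((PySem.List.mem_sorted l (fun x => x) false c).mp hc)
    have hdomS : ∀ c ∈ PySem.List.sorted l (fun x => x) false, pvDomChar c = true := by
      intro c hc; exact hdom c ((PySem.List.mem_sorted l (fun x => x) false c).mp hc)
    have hA : solution s = ((PySem.List.sorted l (fun x => x) false).filter
        (fun c => decide (c ≤ '9'))).map pvVal := by
      unfold solution
      rw [← hl, pvA_loop_sorted _ [] (PySem.List.sorted_pairwise l (fun x => x)) hdomS hlowS]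
      simp
    rw [hA, pvB_closed, ← hl]
    apply PySem.List.eq_of_perm_of_pairwise_le_of_injective (fun x => x) Function.injective_id
    · -- permutation, by counting each value
      rw [List.perm_iff_count]
      intro a
      rw [pvCount_flatMap _ (by decide)]
      by_cases ha : 0 ≤ a ∧ a < 10
      · have hmem : a ∈ PySem.List.pyRange 0 10 1 := PySem.List.mem_pyRange_one.mpr ha
        rw [if_pos hmem]
        have hval : (Char.ofNat (a.toNat + 48)).toNat = a.toNat + 48 :=
          pvOfNat_toNat _ (by omega) (by omega)
        have hav : pvVal (Char.ofNat (a.toNat + 48)) = a := by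
          unfold pvVal; omega
        have hd9 : Char.ofNat (a.toNat + 48) ≤ '9' := by
          rw [pvLe57, hval]; omega
        have k1 : (((PySem.List.sorted l (fun x => x) false).filter
            (fun c => decide (c ≤ '9'))).map pvVal).count a
            = ((PySem.List.sorted l (fun x => x) false).filter
            (fun c => decide (c ≤ '9'))).count (Char.ofNat (a.toNat + 48)) := by
          conv_lhs => rw [← hav]
          exact List.count_map_of_injective _ pvVal pvVal_inj _
        have k2 : ((PySem.List.sorted l (fun x => x) false).filter
            (fun c => decide (c ≤ '9'))).count (Char.ofNat (a.toNat + 48))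
            = (PySem.List.sorted l (fun x => x) false).count (Char.ofNat (a.toNat + 48)) :=
          List.count_filter (by simp [hd9])
        rw [k1, k2]
        exact (PySem.List.sorted_perm l (fun x => x) false).count_eq _
      · have hnm : a ∉ PySem.List.pyRange 0 10 1 := fun h => ha (PySem.List.mem_pyRange_one.mp h)
        rw [if_neg hnm, List.count_eq_zero_of_not_mem]
        intro hmem
        rcases List.mem_map.mp hmem with ⟨c, hcf, hcv⟩
        rcases List.mem_filter.mp hcf with ⟨hcs, hc9⟩
        have hc0 := hlowS c hcs
        rw [decide_eq_true_eq, pvLe57] at hc9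
        unfold pvVal at hcv
        omega
    · -- A's side is sorted
      apply List.Pairwise.map
      · intro c d hcd
        have := (pvLeChar c d).mp hcd
        unfold pvVal; omega
      · exact (PySem.List.sorted_pairwise l (fun x => x)).filter _
    · -- B's side is sorted
      exact pvPairwise_flatMap _ (by decide) _

set_option maxRecDepth 4000 in
theorem solution_changed : Claim_changed_solution := by
  unfold Claim_changed_solution
  refine ⟨by decide, by decide, by decide, by decide, by decide⟩

theorem solution_tight : Claim_exact_solution := by
  intro s hdom hD
  unfold Dom_solution pvDomStr at hdom
  rw [List.all_eq_true] at hdom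
  rcases (pvD_iff s).mp hD with ⟨hlow, c, hc, hc48, hc57⟩
  have hA : solution s = [] := pvA_empty s hdom hlow
  have hB : solution_alt s ≠ [] := by
    rw [pvB_closed]
    intro hnil
    rw [List.flatMap_eq_nil_iff] at hnil
    have hd : ((c.toNat : Int) - 48) ∈ PySem.List.pyRange 0 10 1 :=
      PySem.List.mem_pyRange_one.mpr ⟨by omega, by omega⟩
    have := hnil _ hd
    have hchar : Char.ofNat (((c.toNat : Int) - 48).toNat + 48) = c := by
      apply pvToNat_inj
      rw [pvOfNat_toNat _ (by omega) (by omega)]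
      omega
    rw [hchar] at this
    have hcnt : 0 < s.toList.count c := List.count_pos_iff.mpr hc
    rw [List.eq_nil_iff_forall_not_mem] at this
    exact this _ (List.mem_replicate.mpr ⟨by omega, rfl⟩)
  intro h
  rw [hA] at h
  exact hB h.symm
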